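-- pv_equiv track=rewrite | github.com/cutz-j/AlgorithmStudy | Programmers/[cutz]string.py | solution
-- ===== SOURCE A (Python) =====
-- def solution(s):
--     if len(s) == 4 or len(s) == 6:
--         for cha in s:
--             if ord(cha) < 48 or ord(cha) > 57:
--                 return False
--         return True
--     else:
--         return False
-- ===== SOURCE B (Python) =====
-- def solution(s):
--     # DFA for the regex [0-9]{4}|[0-9]{6}: state = number of ASCII digits
--     # matched so far, -1 = dead state; accept in states 4 and 6.
--     state = 0
--     for ch in s:
--         state = state + 1 if state >= 0 and '0' <= ch <= '9' else -1
--     return state == 4 or state == 6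
-- ===== Notes on version B (the rewrite author's own statement) =====
-- stated objective: alternative
-- what changed: Replaced A's length guard plus early-returning per-character ord loop by a single left-to-right DFA pass (the automaton of the regex [0-9]{4}|[0-9]{6}): one fold carrying a digit-count state with a dead state -1, accepting in states 4 and 6, with no separate length computation.
import Mathlib
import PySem

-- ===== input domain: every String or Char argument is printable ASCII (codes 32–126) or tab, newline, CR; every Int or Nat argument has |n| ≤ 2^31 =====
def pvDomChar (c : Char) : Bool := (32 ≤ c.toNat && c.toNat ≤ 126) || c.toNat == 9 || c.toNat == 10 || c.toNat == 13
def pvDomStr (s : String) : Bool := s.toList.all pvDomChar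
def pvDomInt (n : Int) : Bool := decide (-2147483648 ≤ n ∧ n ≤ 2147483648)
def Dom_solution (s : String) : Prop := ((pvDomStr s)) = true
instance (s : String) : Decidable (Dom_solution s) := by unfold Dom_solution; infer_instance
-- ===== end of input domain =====

-- B replaces A's length guard plus early-returning per-character ord loop by a single
-- left-to-right DFA pass (the automaton of the regex [0-9]{4}|[0-9]{6}): an alternative
-- decomposition of the same O(n) recognition.

-- ===== PORT A =====
-- the for-loop with early return: False as soon as ord(cha) is outside 48..57, True at the end
def solutionLoop : List Char → Bool
  | [] => true
  | c :: rest => if c.toNat < 48 || 57 < c.toNat then false else solutionLoop rest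

def solution (s : String) : Bool :=
  if PySem.Str.len s = 4 ∨ PySem.Str.len s = 6 then solutionLoop s.toList else false

-- ===== PORT B =====
-- DFA transition: state = number of ASCII digits matched so far, -1 = dead state
def solutionStep (st : Int) (c : Char) : Int :=
  if st ≥ 0 ∧ '0' ≤ c ∧ c ≤ '9' then st + 1 else -1

def solution_alt (s : String) : Bool :=
  let st := s.toList.foldl solutionStep 0
  st == 4 || st == 6

-- ===== PRECONDITION & SPEC =====
def Spec_solution (s : String) (out : Bool) : Prop := out = solution_alt s
instance (s : String) (out : Bool) : Decidable (Spec_solution s out) := by unfold Spec_solution; infer_instance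

-- ===== CLAIM (what is proved, stated in full; the proofs are below) =====
def Claim_equal_solution : Prop := ∀ (s : String), Dom_solution s → Spec_solution s (solution s)

-- ===== LEMMAS AND PROOFS =====

theorem step_dead (cs : List Char) : cs.foldl solutionStep (-1) = -1 := by
  induction cs with
  | nil => rfl
  | cons c rest ih =>
    have : solutionStep (-1) c = -1 := by simp [solutionStep]
    simp [List.foldl, this, ih]

theorem isdigit_iff (c : Char) : ('0' ≤ c ∧ c ≤ '9') ↔ (48 ≤ c.toNat ∧ c.toNat ≤ 57) :=
  Iff.rfl

theorem foldl_step (cs : List Char) (n : Int) (hn : 0 ≤ n) :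
    cs.foldl solutionStep n =
      if cs.all (fun c => decide ('0' ≤ c ∧ c ≤ '9')) then n + cs.length else -1 := by
  induction cs generalizing n with
  | nil => simp
  | cons c rest ih =>
    by_cases hd : '0' ≤ c ∧ c ≤ '9'
    · have hstep : solutionStep n c = n + 1 := by simp [solutionStep, hn, hd]
      rw [List.foldl_cons, hstep, ih (n + 1) (by omega)]
      have hdc : (decide ('0' ≤ c ∧ c ≤ '9')) = true := decide_eq_true hd
      rw [List.all_cons, hdc, Bool.true_and, List.length_cons]
      split
      · push_cast; ring
      · rfl
    · have hstep : solutionStep n c = -1 := by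
        simp only [solutionStep, ite_eq_right_iff]
        intro h; exact absurd h.2 hd
      have hdc : (decide ('0' ≤ c ∧ c ≤ '9')) = false := decide_eq_false hd
      rw [List.foldl_cons, hstep, step_dead, List.all_cons, hdc, Bool.false_and, if_neg (by simp)]

theorem solutionLoop_eq_all (cs : List Char) :
    solutionLoop cs = cs.all (fun c => decide ('0' ≤ c ∧ c ≤ '9')) := by
  induction cs with
  | nil => rfl
  | cons c rest ih =>
    have hiff := isdigit_iff c
    by_cases hd : '0' ≤ c ∧ c ≤ '9'
    · have h1 : (c.toNat < 48 || 57 < c.toNat) = false := by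
        have := hiff.mp hd; simp; omega
      simp [solutionLoop, h1, hd, ih]
    · have h1 : (c.toNat < 48 || 57 < c.toNat) = true := by
        have : ¬ (48 ≤ c.toNat ∧ c.toNat ≤ 57) := fun h => hd (hiff.mpr h)
        simp; omega
      simp [solutionLoop, h1, hd]

-- ===== VERDICT (by name: the statement is the Claim_ definition above) =====
theorem solution_spec : Claim_equal_solution := by
  intro s _
  unfold Spec_solution solution solution_alt
  rw [PySem.Str.len_eq, solutionLoop_eq_all, foldl_step s.toList 0 (le_refl 0)]
  show (if (s.toList.length : Int) = 4 ∨ (s.toList.length : Int) = 6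
          then s.toList.all (fun c => decide ('0' ≤ c ∧ c ≤ '9')) else false) = _
  have hbeq : ∀ a b : Int, decide (a = b) = (a == b) := by
    intro a b
    cases h : a == b
    · simpa using beq_eq_false_iff_ne.mp h
    · simpa using beq_iff_eq.mp h
  by_cases hall : s.toList.all (fun c => decide ('0' ≤ c ∧ c ≤ '9')) = true
  · rw [hall, if_pos rfl]
    by_cases h : (s.toList.length : Int) = 4 ∨ (s.toList.length : Int) = 6
    · rcases h with h | h
      · rw [if_pos (Or.inl h), Int.zero_add, h]; decide
      · rw [if_pos (Or.inr h), Int.zero_add, h]; decide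
    · rw [if_neg h, Int.zero_add]
      show false = ((s.toList.length : Int) == 4 || (s.toList.length : Int) == 6)
      rw [← hbeq, ← hbeq]
      rw [not_or] at h
      rw [decide_eq_false h.1, decide_eq_false h.2]
      rfl
  · rw [Bool.not_eq_true] at hall
    rw [hall]
    simp
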